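-- pv_equiv track=rewrite | github.com/rishabhjain02/Data-Structures-And-Algorithms | Heaps/Minimum largest element.py | solve
-- ===== SOURCE A (Python) =====
-- import heapq
--
-- def solve(A, B):
--     new = A[:]
--     n = len(A)
--
--     min_heap = []
--
--     for i in range(n):
--         heapq.heappush(min_heap, (A[i] + A[i], i))
--
--     for _ in range(B):
--         val, index = heapq.heappop(min_heap)
--         new[index] = val
--         heapq.heappush(min_heap, (new[index] + A[index], index))
--
--     return max(new)
-- ===== SOURCE B (Python) =====
-- def solve(A, B):
--     n = len(A)
--     mult = [1] * n
--     for _ in range(B):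
--         j = 0
--         for i in range(n):
--             if (mult[i] + 1) * A[i] < (mult[j] + 1) * A[j]:
--                 j = i
--         mult[j] += 1
--     return max(mult[i] * A[i] for i in range(n))
-- ===== Notes on version B (the rewrite author's own statement) =====
-- stated objective: alternative
-- what changed: Replaces the heap of (value,index) pairs plus a mutated copy of A by a plain multiplier array: each round picks the index minimizing (mult[i]+1)*A[i] with a linear scan and bumps its multiplier, and the answer is the max of mult[i]*A[i]; no heapq, no shadow list.
import Mathlib
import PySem

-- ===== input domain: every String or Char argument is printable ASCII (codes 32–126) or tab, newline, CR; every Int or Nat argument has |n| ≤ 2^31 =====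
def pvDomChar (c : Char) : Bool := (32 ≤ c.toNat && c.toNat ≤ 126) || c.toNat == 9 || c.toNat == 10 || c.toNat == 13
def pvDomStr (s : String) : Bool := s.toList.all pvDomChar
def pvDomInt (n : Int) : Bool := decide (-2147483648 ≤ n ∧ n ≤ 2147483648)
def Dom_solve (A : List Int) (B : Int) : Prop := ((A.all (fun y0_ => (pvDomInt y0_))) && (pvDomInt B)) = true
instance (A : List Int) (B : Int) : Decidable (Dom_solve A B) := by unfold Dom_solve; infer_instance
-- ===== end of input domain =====

-- B replaces A's heap of (value,index) pairs plus a mutated copy of A by a multiplier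
-- array updated via an argmin scan; equivalence of the return values is proved for A ≠ [].

-- ===== PORT A =====
-- heapq with (Int, index) entries: all entries have distinct indices, so the heap's
-- minimum is unique; heappush is modeled as cons and heappop as remove-the-minimum,
-- which is observationally exact for Python's heapq.
def hLt (a b : Int × Nat) : Bool := a.1 < b.1 || (a.1 == b.1 && a.2 < b.2)

def hMin (x : Int × Nat) (xs : List (Int × Nat)) : Int × Nat :=
  xs.foldl (fun m y => if hLt y m then y else m) x

-- the 'for _ in range(B)' loop: state = (new, min_heap)
def loopA (A : List Int) : Nat → List Int × List (Int × Nat) → List Int × List (Int × Nat)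
  | 0, s => s
  | t + 1, (new, h) =>
    match h with
    | [] => (new, h)  -- Python heappop raises IndexError here; unreachable under Pre_solve
    | x :: xs =>
      let m := hMin x xs            -- val, index = heapq.heappop(min_heap)
      let h' := (x :: xs).erase m
      loopA A t (new.set m.2 m.1, (m.1 + A.getD m.2 0, m.2) :: h')

def solve (A : List Int) (B : Int) : Int :=
  let n := A.length
  let heap0 := (List.range n).foldl (fun h i => (A.getD i 0 + A.getD i 0, i) :: h) []
  let new := (loopA A B.toNat (A, heap0)).1
  (PySem.List.max? new (fun v => v)).getD 0  -- max(new); raises on empty new, excluded by Pre_solve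

-- ===== PORT B =====
def nextVal (A mult : List Int) (i : Nat) : Int := (mult.getD i 0 + 1) * A.getD i 0

-- j = argmin scan over range(n)
def pickB (A mult : List Int) : Nat :=
  (List.range A.length).foldl (fun j i => if nextVal A mult i < nextVal A mult j then i else j) 0

def loopB (A : List Int) : Nat → List Int → List Int
  | 0, mult => mult
  | t + 1, mult =>
    let j := pickB A mult
    loopB A t (mult.set j (mult.getD j 0 + 1))

def solve_alt (A : List Int) (B : Int) : Int :=
  let n := A.length
  let mult := loopB A B.toNat (List.replicate n 1)
  (PySem.List.max? ((List.range n).map (fun i => mult.getD i 0 * A.getD i 0)) (fun v => v)).getD 0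

-- ===== PRECONDITION & SPEC =====
-- Pre_solve: on A = [] both Pythons raise (heappop/max on empty), so it is excluded.
def Pre_solve (A : List Int) (B : Int) : Prop := A ≠ []
instance (A : List Int) (B : Int) : Decidable (Pre_solve A B) := by unfold Pre_solve; infer_instance

def pvWitness_solve : List Int × Int := ([3, 1, 4], 5)

def Spec_solve (A : List Int) (B : Int) (out : Int) : Prop := out = solve_alt A B
instance (A : List Int) (B : Int) (out : Int) : Decidable (Spec_solve A B out) := by unfold Spec_solve; infer_instance

-- ===== CLAIM (what is proved, stated in full; the proofs are below) =====
def Claim_equal_solve : Prop := ∀ (A : List Int) (B : Int), Dom_solve A B → Pre_solve A B → Spec_solve A B (solve A B)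

-- ===== LEMMAS AND PROOFS =====

-- canonical heap contents and canonical `new` as functions of the multiplier list
def canonH (A mult : List Int) : List (Int × Nat) :=
  (List.range A.length).map (fun i => (nextVal A mult i, i))

def canonN (A mult : List Int) : List Int :=
  (List.range A.length).map (fun i => mult.getD i 0 * A.getD i 0)

def HMinOf (h : List (Int × Nat)) (m : Int × Nat) : Prop :=
  m ∈ h ∧ ∀ y ∈ h, hLt y m = false

theorem hLt_iff (a b : Int × Nat) : hLt a b = true ↔ (a.1 < b.1 ∨ (a.1 = b.1 ∧ a.2 < b.2)) := by
  simp [hLt]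

theorem hLt_false_iff (a b : Int × Nat) : hLt a b = false ↔ (b.1 < a.1 ∨ (a.1 = b.1 ∧ b.2 ≤ a.2)) := by
  simp [hLt]; omega

theorem hMin_isMin (x : Int × Nat) (xs : List (Int × Nat)) : HMinOf (x :: xs) (hMin x xs) := by
  induction xs generalizing x with
  | nil =>
    refine ⟨List.mem_singleton.mpr rfl, ?_⟩
    intro y hy; simp at hy; subst hy; simp [hMin, hLt_false_iff]
  | cons y ys ih =>
    by_cases hc : hLt y x = true
    · have hstep : hMin x (y :: ys) = hMin y ys := by simp [hMin, hc]
      obtain ⟨hmem, hmin⟩ := ih y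
      rw [hstep]
      refine ⟨?_, ?_⟩
      · exact List.mem_cons_of_mem _ hmem
      · intro z hz
        rcases List.mem_cons.mp hz with h | h
        · subst h
          have h1 : hLt y (hMin y ys) = false := hmin y List.mem_cons_self
          rw [hLt_iff] at hc; rw [hLt_false_iff] at h1 ⊢; omega
        · exact hmin z h
    · have hstep : hMin x (y :: ys) = hMin x ys := by simp [hMin, hc]
      obtain ⟨hmem, hmin⟩ := ih x
      rw [hstep]
      refine ⟨?_, ?_⟩
      · rcases List.mem_cons.mp hmem with h | h
        · rw [h]; exact List.mem_cons_self
        · exact List.mem_cons_of_mem _ (List.mem_cons_of_mem _ h)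
      · intro z hz
        rcases List.mem_cons.mp hz with h | h
        · subst h; exact hmin z List.mem_cons_self
        · rcases List.mem_cons.mp h with h2 | h2
          · subst h2
            have h1 : hLt x (hMin x ys) = false := hmin x List.mem_cons_self
            simp only [Bool.not_eq_true] at hc
            rw [hLt_false_iff] at h1 hc ⊢; omega
          · exact hmin z (List.mem_cons_of_mem _ h2)

theorem isMin_unique {h : List (Int × Nat)} {m m' : Int × Nat}
    (h1 : HMinOf h m) (h2 : HMinOf h m') : m = m' := by
  have a1 := h2.2 m h1.1
  have a2 := h1.2 m' h2.1
  rw [hLt_false_iff] at a1 a2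
  have : m.1 = m'.1 ∧ m.2 = m'.2 := by omega
  exact Prod.ext this.1 this.2

theorem isMin_perm {h h' : List (Int × Nat)} {m : Int × Nat}
    (hp : h.Perm h') (h1 : HMinOf h m) : HMinOf h' m :=
  ⟨hp.mem_iff.mp h1.1, fun y hy => h1.2 y (hp.mem_iff.mpr hy)⟩

theorem argmin_range (f : Nat → Int) :
    ∀ n : Nat, 0 < n →
      (List.range n).foldl (fun j i => if f i < f j then i else j) 0 < n ∧
      ∀ i < n, f ((List.range n).foldl (fun j i => if f i < f j then i else j) 0) ≤ f i ∧
        (f ((List.range n).foldl (fun j i => if f i < f j then i else j) 0) = f i →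
          (List.range n).foldl (fun j i => if f i < f j then i else j) 0 ≤ i) := by
  intro n
  induction n with
  | zero => intro h; omega
  | succ n ih =>
    intro _
    rw [List.range_succ, List.foldl_append]
    by_cases hn : 0 < n
    · obtain ⟨hlt, hmin⟩ := ih hn
      set j := (List.range n).foldl (fun j i => if f i < f j then i else j) 0 with hj
      simp only [List.foldl_cons, List.foldl_nil]
      by_cases hc : f n < f j
      · simp only [hc, if_pos]
        refine ⟨by omega, ?_⟩
        intro i hi
        rcases Nat.lt_succ_iff_lt_or_eq.mp hi with h | h
        · have := (hmin i h).1; constructor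
          · omega
          · intro he; omega
        · subst h; exact ⟨le_refl _, fun _ => le_refl _⟩
      · simp only [hc, if_neg, not_false_iff]
        refine ⟨by omega, ?_⟩
        intro i hi
        rcases Nat.lt_succ_iff_lt_or_eq.mp hi with h | h
        · exact hmin i h
        · subst h; exact ⟨by omega, fun _ => by omega⟩
    · have hn0 : n = 0 := by omega
      subst hn0
      simp

theorem pickB_isMin (A mult : List Int) (hA : A ≠ []) :
    HMinOf (canonH A mult) (nextVal A mult (pickB A mult), pickB A mult) ∧ pickB A mult < A.length := by
  have hn : 0 < A.length := List.length_pos_iff.mpr hA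
  obtain ⟨hlt, hmin⟩ := argmin_range (nextVal A mult) A.length hn
  have hpb : pickB A mult = (List.range A.length).foldl
      (fun j i => if nextVal A mult i < nextVal A mult j then i else j) 0 := rfl
  rw [hpb]
  set j := (List.range A.length).foldl
      (fun j i => if nextVal A mult i < nextVal A mult j then i else j) 0
  refine ⟨⟨List.mem_map.mpr ⟨j, List.mem_range.mpr hlt, rfl⟩, ?_⟩, hlt⟩
  intro y hy
  obtain ⟨i, hi, rfl⟩ := List.mem_map.mp hy
  obtain ⟨h1, h2⟩ := hmin i (List.mem_range.mp hi)
  rw [hLt_false_iff]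
  simp only
  omega

theorem getD_set_self (l : List Int) (j : Nat) (v : Int) (h : j < l.length) :
    (l.set j v).getD j 0 = v := by
  rw [List.getD_eq_getElem _ _ (by simpa using h)]
  simp

theorem getD_set_ne (l : List Int) {i j : Nat} (v : Int) (h : j ≠ i) :
    (l.set j v).getD i 0 = l.getD i 0 := by
  simp [List.getD, List.getElem?_set_ne h]

theorem canonN_set (A mult : List Int) (j : Nat) (v : Int) (hjm : j < mult.length) :
    canonN A (mult.set j v) = (canonN A mult).set j (v * A.getD j 0) := by
  apply List.ext_getElem
  · simp [canonN]
  · intro k hk1 hk2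
    simp only [canonN, List.getElem_map, List.getElem_range]
    rw [List.getElem_set]
    by_cases hkj : j = k
    · subst hkj
      rw [if_pos rfl, getD_set_self _ _ _ hjm]
    · rw [if_neg hkj, getD_set_ne _ _ hkj, List.getElem_map, List.getElem_range]

theorem canonH_set (A mult : List Int) (j : Nat) (v : Int) :
    canonH A (mult.set j v) = (canonH A mult).set j (nextVal A (mult.set j v) j, j) := by
  apply List.ext_getElem
  · simp [canonH]
  · intro k hk1 hk2
    simp only [canonH, List.getElem_map, List.getElem_range] at *
    rw [List.getElem_set]
    by_cases hkj : j = k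
    · subst hkj; simp
    · simp only [if_neg hkj]
      simp only [nextVal]
      rw [getD_set_ne _ _ hkj, List.getElem_map, List.getElem_range]

theorem canonH_nodup (A mult : List Int) : (canonH A mult).Nodup := by
  apply List.Nodup.map _ List.nodup_range
  intro a b hab
  exact (Prod.mk.injEq _ _ _ _).mp hab |>.2

theorem canonH_getElem (A mult : List Int) (j : Nat) (hj : j < A.length) :
    (canonH A mult)[j]'(by simpa [canonH] using hj) = (nextVal A mult j, j) := by
  simp [canonH]

theorem set_perm_cons_eraseIdx {α : Type} (l : List α) (j : Nat) (a : α) (h : j < l.length) :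
    (l.set j a).Perm (a :: l.eraseIdx j) := by
  rw [List.set_eq_take_append_cons_drop, if_pos h, List.eraseIdx_eq_take_drop_succ]
  exact List.perm_middle

theorem loopA_eq (A : List Int) (hA : A ≠ []) :
    ∀ (t : Nat) (mult new : List Int) (h : List (Int × Nat)),
      mult.length = A.length → new = canonN A mult → h.Perm (canonH A mult) →
      (loopA A t (new, h)).1 = canonN A (loopB A t mult) := by
  intro t
  induction t with
  | zero => intro mult new h _ hnew _; simpa [loopA, loopB] using hnew
  | succ t ih =>
    intro mult new h hlen hnew hperm
    have hn : 0 < A.length := List.length_pos_iff.mpr hA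
    have hhlen : 0 < h.length := by
      rw [hperm.length_eq]; simp [canonH]; omega
    obtain ⟨x, xs, rfl⟩ : ∃ y ys, h = y :: ys := by
      cases h with
      | nil => simp at hhlen
      | cons y ys => exact ⟨y, ys, rfl⟩
    obtain ⟨hmin2, hjlt⟩ := pickB_isMin A mult hA
    have hjm : pickB A mult < mult.length := by omega
    have hmeq : hMin x xs = (nextVal A mult (pickB A mult), pickB A mult) :=
      isMin_unique (hMin_isMin x xs) (isMin_perm hperm.symm hmin2)
    have hstepA : loopA A (t + 1) (new, x :: xs) =
        loopA A t (new.set (pickB A mult) (nextVal A mult (pickB A mult)),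
          (nextVal A mult (pickB A mult) + A.getD (pickB A mult) 0, pickB A mult) ::
            (x :: xs).erase (nextVal A mult (pickB A mult), pickB A mult)) := by
      simp only [loopA, hmeq]
    have hstepB : loopB A (t + 1) mult =
        loopB A t (mult.set (pickB A mult) (mult.getD (pickB A mult) 0 + 1)) := by
      simp only [loopB]
    rw [hstepA, hstepB]
    set j := pickB A mult with hj
    set mult' := mult.set j (mult.getD j 0 + 1) with hmult'
    apply ih
    · simp [hmult', hlen]
    · rw [hnew, hmult', canonN_set A mult j _ hjm]
      rfl
    · -- heap permutation
      have hval : nextVal A mult' j = nextVal A mult j + A.getD j 0 := by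
        simp only [nextVal, hmult', getD_set_self mult j _ hjm]
        ring
      have h1 : ((x :: xs).erase (nextVal A mult j, j)).Perm
          ((canonH A mult).erase (nextVal A mult j, j)) := hperm.erase _
      have h2 : (canonH A mult).erase (nextVal A mult j, j) = (canonH A mult).eraseIdx j := by
        have := (canonH_nodup A mult).erase_getElem j (by simpa [canonH] using hjlt)
        rwa [canonH_getElem A mult j hjlt] at this
      have h3 : (canonH A mult').Perm
          ((nextVal A mult' j, j) :: (canonH A mult).eraseIdx j) := by
        rw [canonH_set A mult j _]
        have := set_perm_cons_eraseIdx (canonH A mult) j (nextVal A mult' j, j)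
          (by simpa [canonH] using hjlt)
        simpa [hmult'] using this
      refine List.Perm.trans ?_ h3.symm
      rw [hval]
      exact (h2 ▸ h1).cons _

theorem foldl_cons_rev (g : Nat → Int × Nat) :
    ∀ (l : List Nat) (acc : List (Int × Nat)),
      l.foldl (fun h i => g i :: h) acc = (l.map g).reverse ++ acc := by
  intro l
  induction l with
  | nil => intro acc; simp
  | cons x xs ih => intro acc; simp [ih]

theorem solve_eq (A : List Int) (B : Int) (hA : A ≠ []) : solve A B = solve_alt A B := by
  have hn : 0 < A.length := List.length_pos_iff.mpr hA
  have hmap : (List.range A.length).map (fun i => (A.getD i 0 + A.getD i 0, i)) =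
      canonH A (List.replicate A.length 1) := by
    apply List.map_congr_left
    intro i hi
    have hilt : i < A.length := List.mem_range.mp hi
    show _ = (nextVal A (List.replicate A.length 1) i, i); simp only [nextVal]
    rw [List.getD_replicate 1 hilt]
    apply Prod.ext
    · ring_nf
    · rfl
  have hperm : ((List.range A.length).foldl
      (fun h i => (A.getD i 0 + A.getD i 0, i) :: h) []).Perm
      (canonH A (List.replicate A.length 1)) := by
    rw [foldl_cons_rev, List.append_nil, ← hmap]
    exact List.reverse_perm _
  have hnew : A = canonN A (List.replicate A.length 1) := by
    apply List.ext_getElem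
    · simp [canonN]
    · intro k hk1 hk2
      simp only [canonN, List.getElem_map, List.getElem_range]
      rw [List.getD_replicate 1 (by simpa [canonN] using hk2), one_mul,
        List.getD_eq_getElem _ _ hk1]
  have hloop := loopA_eq A hA B.toNat (List.replicate A.length 1) A
    ((List.range A.length).foldl (fun h i => (A.getD i 0 + A.getD i 0, i) :: h) [])
    (by simp) hnew hperm
  simp only [solve, solve_alt]
  rw [hloop]
  rfl

-- ===== VERDICT (by name: the statement is the Claim_ definition above) =====
theorem solve_spec : Claim_equal_solve := by
  intro A B _ hpre
  unfold Spec_solve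
  exact solve_eq A B hpre
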